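-- pv_equiv track=rewrite | github.com/Javert899/pm4py-mdl | pm4pymdl/visualization/mvp/gen_framework2/versions/util.py | get_objects_edges_map_frequency
-- ===== SOURCE A (Python) =====
-- from collections import Counter
--
-- def get_objects_edges_map_frequency(key, res):
--     edges = [x for x in res["edges"] if x[0] == key]
--     edges_map = {}
--     for x in edges:
--         k = (x[1], x[2])
--         if k not in edges_map:
--             edges_map[k] = Counter()
--         edges_map[k][x[5]] += res["edges"][x]
--     for k in edges_map:
--         edges_map[k] = len(edges_map[k])
--     return edges_map
-- ===== SOURCE B (Python) =====
-- def get_objects_edges_map_frequency(key, res):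
--     seen = set()
--     edges_map = {}
--     for x in res["edges"]:
--         if x[0] != key:
--             continue
--         t = ((x[1], x[2]), x[5])
--         if t not in seen:
--             seen.add(t)
--             edges_map[t[0]] = edges_map.get(t[0], 0) + 1
--     return edges_map
-- ===== Notes on version B (the rewrite author's own statement) =====
-- stated objective: alternative
-- what changed: One pass over the edge keys maintaining a flat set of ((src,dst),value) pairs and a running count per edge pair incremented on first sight, instead of building a dict of per-pair Counters (adding the stored frequencies, which the result never uses) and converting each Counter to its length in a second pass.
import Mathlib
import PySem

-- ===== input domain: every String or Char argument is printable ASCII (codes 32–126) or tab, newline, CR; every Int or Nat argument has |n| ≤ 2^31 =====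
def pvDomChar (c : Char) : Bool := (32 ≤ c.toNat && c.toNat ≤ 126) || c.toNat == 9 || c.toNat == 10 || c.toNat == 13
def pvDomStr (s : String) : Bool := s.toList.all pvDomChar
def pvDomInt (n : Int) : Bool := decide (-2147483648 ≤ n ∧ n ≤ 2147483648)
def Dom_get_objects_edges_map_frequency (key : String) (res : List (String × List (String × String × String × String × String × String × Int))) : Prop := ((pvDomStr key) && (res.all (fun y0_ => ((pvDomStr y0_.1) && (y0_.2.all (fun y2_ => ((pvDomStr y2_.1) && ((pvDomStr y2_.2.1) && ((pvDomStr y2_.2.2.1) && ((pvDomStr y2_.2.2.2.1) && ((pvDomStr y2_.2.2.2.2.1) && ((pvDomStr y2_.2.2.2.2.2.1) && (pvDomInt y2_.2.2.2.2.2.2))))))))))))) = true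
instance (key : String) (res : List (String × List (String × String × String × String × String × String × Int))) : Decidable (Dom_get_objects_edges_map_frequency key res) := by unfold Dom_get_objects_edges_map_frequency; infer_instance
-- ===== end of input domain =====

-- B replaces A's dict of per-pair Counters plus a second len-conversion pass by one pass that keeps
-- a flat set of ((src,dst),value) pairs and increments a running count per pair on first sight
-- (objective: alternative; same asymptotic cost).

-- both ports decode res["edges"] — in Python a dict keyed by 6-tuples of strings with int values —
-- from its association-list representation (7-tuples); duplicate keys collapse exactly as Python's
-- dict construction does (first position, last value): PySem.Dict.ofList
def pvDecodeEdges (inner : List (String × String × String × String × String × String × Int)) : PySem.Dict (String × String × String × String × String × String) Int :=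
  PySem.Dict.ofList (inner.map (fun x => ((x.1, x.2.1, x.2.2.1, x.2.2.2.1, x.2.2.2.2.1, x.2.2.2.2.2.1), x.2.2.2.2.2.2)))

-- ===== PORT A =====
-- the body of A's 'for x in edges' loop: edges_map[k] = Counter() when k is new, then
-- edges_map[k][x[5]] += res["edges"][x]  (Counter lookup defaults to 0 = Dict.modify with default 0;
-- x is a key of d, so d.getD x 0 never takes its default)
def pvALoopBody (d : PySem.Dict (String × String × String × String × String × String) Int) (em : PySem.Dict (String × String) (PySem.Dict String Int)) (x : String × String × String × String × String × String) : PySem.Dict (String × String) (PySem.Dict String Int) :=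
  let k := (x.2.1, x.2.2.1)
  let em' := if em.contains k then em else em.insert k PySem.Dict.empty
  em'.insert k ((em'.getD k PySem.Dict.empty).modify x.2.2.2.2.2 0 (fun v => v + d.getD x 0))

def get_objects_edges_map_frequency (key : String) (res : List (String × List (String × String × String × String × String × String × Int))) : List (String × String × Int) :=
  match (PySem.Dict.ofList res).get? "edges" with
  | none => []  -- KeyError 'edges' (excluded by Pre_)
  | some inner =>
    let d := pvDecodeEdges inner
    let edges := d.keys.filter (fun x => x.1 == key)
    let em := edges.foldl (pvALoopBody d) PySem.Dict.empty
    -- for k in edges_map: edges_map[k] = len(edges_map[k])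
    em.items.map (fun p => (p.1.1, p.1.2, (p.2.size : Int)))

-- ===== PORT B =====
-- Source B's single loop: skip non-matching keys; on a never-seen ((src,dst),value) pair record it
-- and bump the running count of (src,dst)
def pvAltLoop (key : String) : List (String × String × String × String × String × String) → PySem.Set ((String × String) × String) → PySem.Dict (String × String) Int → PySem.Dict (String × String) Int
  | [], _, m => m
  | x :: rest, seen, m =>
    if x.1 != key then pvAltLoop key rest seen m
    else
      let t := ((x.2.1, x.2.2.1), x.2.2.2.2.2)
      if PySem.Set.contains seen t then pvAltLoop key rest seen m
      else pvAltLoop key rest (PySem.Set.add seen t) (m.insert t.1 (m.getD t.1 0 + 1))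

def get_objects_edges_map_frequency_alt (key : String) (res : List (String × List (String × String × String × String × String × String × Int))) : List (String × String × Int) :=
  match (PySem.Dict.ofList res).get? "edges" with
  | none => []  -- KeyError 'edges' in Source B too (excluded by Pre_)
  | some inner =>
    let m := pvAltLoop key (pvDecodeEdges inner).keys PySem.Set.empty PySem.Dict.empty
    m.items.map (fun p => (p.1.1, p.1.2, p.2))

-- ===== PRECONDITION & SPEC =====
-- Pre_ excludes exactly the inputs whose dict res has no key "edges": both A and B raise KeyError there.
def Pre_get_objects_edges_map_frequency (key : String) (res : List (String × List (String × String × String × String × String × String × Int))) : Prop :=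
  ((PySem.Dict.ofList res).get? "edges").isSome = true
instance (key : String) (res : List (String × List (String × String × String × String × String × String × Int))) : Decidable (Pre_get_objects_edges_map_frequency key res) := by unfold Pre_get_objects_edges_map_frequency; infer_instance

def pvWitness_get_objects_edges_map_frequency : String × (List (String × List (String × String × String × String × String × String × Int))) :=
  ("k", [("edges", [("k", "a", "b", "c", "d", "v", 1), ("z", "a", "b", "c", "d", "w", 2)])])

def Spec_get_objects_edges_map_frequency (key : String) (res : List (String × List (String × String × String × String × String × String × Int))) (out : List (String × String × Int)) : Prop := out = get_objects_edges_map_frequency_alt key res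
instance (key : String) (res : List (String × List (String × String × String × String × String × String × Int))) (out : List (String × String × Int)) : Decidable (Spec_get_objects_edges_map_frequency key res out) := by unfold Spec_get_objects_edges_map_frequency; infer_instance

-- ===== CLAIM (what is proved, stated in full; the proofs are below) =====
def Claim_equal_get_objects_edges_map_frequency : Prop := ∀ (key : String) (res : List (String × List (String × String × String × String × String × String × Int))), Dom_get_objects_edges_map_frequency key res → Pre_get_objects_edges_map_frequency key res → Spec_get_objects_edges_map_frequency key res (get_objects_edges_map_frequency key res)

-- ===== LEMMAS AND PROOFS =====

-- in a dict with nodup keys, an items entry whose key has get? k = some c is (k, c)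
theorem pvItemUnique {κ ν : Type} [BEq κ] [LawfulBEq κ] (d : PySem.Dict κ ν) (hnd : d.keys.Nodup)
    {k : κ} {c : ν} (hc : d.get? k = some c) {p : κ × ν} (hp : p ∈ d.items) (h : p.1 = k) :
    p = (k, c) := by
  obtain ⟨p1, p2⟩ := p
  dsimp at h; subst h
  have h2 := PySem.Dict.get?_of_mem_items d hp hnd
  rw [hc] at h2
  cases h2; rfl

-- replacing the entry at key k by a value of unchanged size is invisible to the size map
theorem pvReplaceCongr (em : PySem.Dict (String × String) (PySem.Dict String Int))
    (hnd : em.keys.Nodup) {k : String × String} {c : PySem.Dict String Int}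
    (hc : em.get? k = some c) (n : Int) (hn : n = (c.size : Int)) :
    em.items.map (fun p => if (p.1 == k) = true then (k, n) else (p.1, (p.2.size : Int)))
      = em.items.map (fun p => (p.1, (p.2.size : Int))) := by
  apply List.map_congr_left
  intro p hp
  by_cases h : (p.1 == k) = true
  · have hpk : p = (k, c) := pvItemUnique em hnd hc hp (by simpa using h)
    subst hpk; simp [hn]
  · simp [h]

-- B's running count at key k is the size of A's Counter there
theorem pvGetDCount (em : PySem.Dict (String × String) (PySem.Dict String Int))
    (hnd : em.keys.Nodup) {k : String × String} {c : PySem.Dict String Int}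
    (hc : em.get? k = some c) (m : PySem.Dict (String × String) Int)
    (h1 : m.items = em.items.map (fun p => (p.1, (p.2.size : Int)))) :
    m.getD k 0 = (c.size : Int) := by
  have hmem : (k, c) ∈ em.items := (PySem.Dict.get?_eq_some_iff_mem_items em k c hnd).1 hc
  have hmem' : (k, (c.size : Int)) ∈ m.items := by
    rw [h1]; exact List.mem_map.2 ⟨(k, c), hmem, rfl⟩
  have hndm : m.keys.Nodup := by
    simpa [PySem.Dict.keys, h1, Function.comp] using hnd
  exact PySem.Dict.getD_of_mem_items m hmem' hndm 0

-- loop invariant: B's running counts are exactly the sizes of A's Counters (same keys, same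
-- positions), and B's seen set holds exactly the (pair, value) combinations present in A's Counters
theorem pvLoop_inv (key : String) (d : PySem.Dict (String × String × String × String × String × String) Int)
    (xs : List (String × String × String × String × String × String)) :
    ∀ (em : PySem.Dict (String × String) (PySem.Dict String Int))
      (seen : PySem.Set ((String × String) × String)) (m : PySem.Dict (String × String) Int),
    em.keys.Nodup →
    m.items = em.items.map (fun p => (p.1, (p.2.size : Int))) →
    (∀ k v, ((k, v) ∈ seen) ↔ ∃ c, em.get? k = some c ∧ c.contains v = true) →
    (pvAltLoop key xs seen m).items
      = (xs.foldl (fun acc x => if x.1 == key then pvALoopBody d acc x else acc) em).items.map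
          (fun p => (p.1, (p.2.size : Int))) := by
  induction xs with
  | nil => intro em seen m _ h1 _; simpa [pvAltLoop] using h1
  | cons x rest ih =>
    intro em seen m hnd h1 h2
    by_cases hx : (x.1 == key) = true
    · have hsb : (x.1 != key) = false := by simp [bne, hx]
      have hkeys : m.keys = em.keys := by
        simp [PySem.Dict.keys, h1]
      by_cases hs : PySem.Set.contains seen ((x.2.1, x.2.2.1), x.2.2.2.2.2) = true
      · -- already seen: B leaves its state; A bumps a stored count in place, no Counter changes size
        obtain ⟨c, hc, hcv⟩ := (h2 (x.2.1, x.2.2.1) x.2.2.2.2.2).1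
          (by simpa [PySem.Set.contains, List.contains_iff_mem] using hs)
        have hcont : em.contains (x.2.1, x.2.2.1) = true := by
          rw [PySem.Dict.contains_eq_isSome_get?, hc]; rfl
        have hbody : pvALoopBody d em x
            = em.insert (x.2.1, x.2.2.1) (c.modify x.2.2.2.2.2 0 (fun v => v + d.getD x 0)) := by
          simp [pvALoopBody, hcont, PySem.Dict.getD_of_get?_eq_some _ _ hc]
        have hB : pvAltLoop key (x :: rest) seen m = pvAltLoop key rest seen m := by
          simp only [pvAltLoop, hsb, Bool.false_eq_true, if_false]
          rw [if_pos hs]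
        rw [hB, List.foldl_cons, if_pos hx, hbody]
        set c2 := c.modify x.2.2.2.2.2 0 (fun v => v + d.getD x 0) with hc2
        have hsz : (c2.size : Int) = (c.size : Int) := by
          simp [hc2, PySem.Dict.modify, PySem.Dict.size_insert, hcv]
        apply ih _ seen m
        · simpa [PySem.Dict.keys_insert_of_contains em c2 hcont] using hnd
        · rw [PySem.Dict.items_insert_of_contains em c2 hcont, List.map_map]
          have hcomp : ((fun q : (String × String) × PySem.Dict String Int => (q.1, (q.2.size : Int)))
                ∘ (fun p : (String × String) × PySem.Dict String Int =>
                    if (p.1 == (x.2.1, x.2.2.1)) = true then ((x.2.1, x.2.2.1), c2) else p))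
              = (fun p : (String × String) × PySem.Dict String Int =>
                  if (p.1 == (x.2.1, x.2.2.1)) = true then ((x.2.1, x.2.2.1), (c2.size : Int))
                  else (p.1, (p.2.size : Int))) := by
            funext p; by_cases h : p.1 = (x.2.1, x.2.2.1) <;> simp [h]
          rw [hcomp, pvReplaceCongr em hnd hc (c2.size : Int) hsz]
          exact h1
        · intro k' v
          rw [h2 k' v]
          by_cases hk' : k' = (x.2.1, x.2.2.1)
          · subst hk'
            rw [PySem.Dict.get?_insert, if_pos rfl]
            constructor
            · rintro ⟨c', hc', hv⟩
              rw [hc] at hc'; cases hc'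
              exact ⟨c2, rfl, by simp [hc2, PySem.Dict.contains_modify, hv]⟩
            · rintro ⟨c', hc', hv⟩
              cases hc'
              refine ⟨c, hc, ?_⟩
              rw [hc2, PySem.Dict.contains_modify] at hv
              rcases Bool.or_eq_true_iff.1 hv with h | h
              · have : v = x.2.2.2.2.2 := by simpa using h
                rw [this]; exact hcv
              · exact h
          · rw [PySem.Dict.get?_insert, if_neg hk']
      · -- first occurrence of this ((src,dst),value) combination
        have hns : ((x.2.1, x.2.2.1), x.2.2.2.2.2) ∉ seen := by
          simpa [PySem.Set.contains, List.contains_iff_mem] using hs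
        have hB : pvAltLoop key (x :: rest) seen m
            = pvAltLoop key rest (PySem.Set.add seen ((x.2.1, x.2.2.1), x.2.2.2.2.2))
                (m.insert (x.2.1, x.2.2.1) (m.getD (x.2.1, x.2.2.1) 0 + 1)) := by
          simp only [pvAltLoop, hsb, Bool.false_eq_true, if_false]
          rw [if_neg hs]
        have hseen' : ∀ (k' : String × String) (v : String),
            (k', v) ∈ PySem.Set.add seen ((x.2.1, x.2.2.1), x.2.2.2.2.2)
              ↔ (k', v) ∈ seen ∨ (k', v) = ((x.2.1, x.2.2.1), x.2.2.2.2.2) :=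
          fun k' v => PySem.Set.mem_add seen _ _
        rw [hB, List.foldl_cons, if_pos hx]
        by_cases hcont : em.contains (x.2.1, x.2.2.1) = true
        · -- the pair is known but this value is new for it: one Counter grows by one key
          have hsome : (em.get? (x.2.1, x.2.2.1)).isSome = true := by
            rw [← PySem.Dict.contains_eq_isSome_get?]; exact hcont
          obtain ⟨c, hc⟩ := Option.isSome_iff_exists.mp hsome
          have hcv : c.contains x.2.2.2.2.2 = false := by
            by_contra hcv
            exact hns ((h2 (x.2.1, x.2.2.1) x.2.2.2.2.2).2
              ⟨c, hc, by simpa using Bool.not_eq_false _ |>.mp hcv⟩)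
          have hbody : pvALoopBody d em x
              = em.insert (x.2.1, x.2.2.1) (c.modify x.2.2.2.2.2 0 (fun v => v + d.getD x 0)) := by
            simp [pvALoopBody, hcont, PySem.Dict.getD_of_get?_eq_some _ _ hc]
          rw [hbody]
          set c2 := c.modify x.2.2.2.2.2 0 (fun v => v + d.getD x 0) with hc2
          have hsz : (c2.size : Int) = (c.size : Int) + 1 := by
            simp [hc2, PySem.Dict.modify, PySem.Dict.size_insert, hcv]
          have hmc : m.contains (x.2.1, x.2.2.1) = true := by
            rw [PySem.Dict.contains_iff_mem_keys, hkeys, ← PySem.Dict.contains_iff_mem_keys]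
            exact hcont
          have hgd : m.getD (x.2.1, x.2.2.1) 0 = (c.size : Int) := pvGetDCount em hnd hc m h1
          apply ih _ _ _
          · simpa [PySem.Dict.keys_insert_of_contains em c2 hcont] using hnd
          · rw [PySem.Dict.items_insert_of_contains em c2 hcont,
                PySem.Dict.items_insert_of_contains m _ hmc, List.map_map, h1, List.map_map]
            apply List.map_congr_left
            intro p hp
            by_cases h : p.1 = (x.2.1, x.2.2.1)
            · have hpk : p = ((x.2.1, x.2.2.1), c) := pvItemUnique em hnd hc hp h
              subst hpk
              simp [hgd, hsz]
            · simp [h]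
          · intro k' v
            rw [hseen' k' v, h2 k' v]
            by_cases hk' : k' = (x.2.1, x.2.2.1)
            · subst hk'
              rw [PySem.Dict.get?_insert, if_pos rfl]
              constructor
              · rintro (⟨c', hc', hv⟩ | hv)
                · rw [hc] at hc'; cases hc'
                  exact ⟨c2, rfl, by simp [hc2, PySem.Dict.contains_modify, hv]⟩
                · cases hv
                  exact ⟨c2, rfl, by simp [hc2, PySem.Dict.contains_modify]⟩
              · rintro ⟨c', hc', hv⟩
                cases hc'
                rw [hc2, PySem.Dict.contains_modify] at hv
                rcases Bool.or_eq_true_iff.1 hv with h | h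
                · exact Or.inr (by simpa using h)
                · exact Or.inl ⟨c, hc, h⟩
            · rw [PySem.Dict.get?_insert, if_neg hk']
              constructor
              · rintro (h | hv)
                · exact h
                · exact absurd (congrArg Prod.fst hv) (by simpa using hk')
              · exact Or.inl
        · -- brand-new pair: A appends a fresh one-entry Counter, B appends count 1
          have hcont' : em.contains (x.2.1, x.2.2.1) = false := by
            simpa using Bool.not_eq_true _ |>.mp hcont
          have hget : em.get? (x.2.1, x.2.2.1) = none := by
            have := PySem.Dict.contains_eq_isSome_get? em (x.2.1, x.2.2.1)
            rw [hcont'] at this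
            exact Option.not_isSome_iff_eq_none.1 (by rw [← this]; simp)
          have hknotmem : (x.2.1, x.2.2.1) ∉ em.keys := by
            rw [← PySem.Dict.contains_iff_mem_keys]; simp [hcont']
          set c2 := (PySem.Dict.empty : PySem.Dict String Int).modify x.2.2.2.2.2 0
              (fun v => v + d.getD x 0) with hc2
          have hbody : pvALoopBody d em x
              = (em.insert (x.2.1, x.2.2.1) PySem.Dict.empty).insert (x.2.1, x.2.2.1) c2 := by
            simp [pvALoopBody, hcont', hc2]
          have hcont1 : (em.insert (x.2.1, x.2.2.1) (PySem.Dict.empty : PySem.Dict String Int)).contains (x.2.1, x.2.2.1) = true := by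
            simp
          have hitems : (pvALoopBody d em x).items = em.items ++ [((x.2.1, x.2.2.1), c2)] := by
            rw [hbody, PySem.Dict.items_insert_of_contains _ c2 hcont1,
                PySem.Dict.items_insert_of_not_contains em _ hcont']
            rw [List.map_append]
            congr 1
            · have hid : ∀ p ∈ em.items,
                  (if (p.1 == (x.2.1, x.2.2.1)) = true then ((x.2.1, x.2.2.1), c2) else p) = id p := by
                intro p hp
                have hne : ¬ p.1 = (x.2.1, x.2.2.1) := by
                  intro h
                  exact hknotmem (h ▸ (by
                    simpa [PySem.Dict.keys] using List.mem_map_of_mem (f := Prod.fst) hp))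
                simp [hne]
              rw [List.map_congr_left hid, List.map_id]
            · simp
          have hsz1 : (c2.size : Int) = 1 := by
            simp [hc2, PySem.Dict.modify, PySem.Dict.size_insert, PySem.Dict.contains_empty]
          have hmc : m.contains (x.2.1, x.2.2.1) = false := by
            have hnm : (x.2.1, x.2.2.1) ∉ m.keys := by rw [hkeys]; exact hknotmem
            rw [← Bool.not_eq_true]
            exact fun h => hnm ((PySem.Dict.contains_iff_mem_keys m _).1 h)
          have hgd : m.getD (x.2.1, x.2.2.1) 0 = 0 := PySem.Dict.getD_of_not_contains m 0 hmc
          apply ih _ _ _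
          · rw [hbody, PySem.Dict.keys_insert_of_contains _ c2 hcont1,
                PySem.Dict.keys_insert_of_not_contains em _ hcont']
            rw [List.nodup_append]
            refine ⟨hnd, List.nodup_singleton _, ?_⟩
            intro a ha b hb
            rcases List.mem_singleton.1 hb with rfl
            exact fun h => hknotmem (h ▸ ha)
          · rw [hitems, PySem.Dict.items_insert_of_not_contains m _ hmc, h1, List.map_append, hgd]
            simp [hsz1]
          · intro k' v
            rw [hseen' k' v, h2 k' v]
            by_cases hk' : k' = (x.2.1, x.2.2.1)
            · subst hk'
              rw [hbody, PySem.Dict.get?_insert, if_pos rfl]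
              constructor
              · rintro (⟨c', hc', hv⟩ | hv)
                · rw [hget] at hc'; cases hc'
                · cases hv
                  exact ⟨c2, rfl, by simp [hc2, PySem.Dict.contains_modify]⟩
              · rintro ⟨c', hc', hv⟩
                cases hc'
                rw [hc2, PySem.Dict.contains_modify] at hv
                rcases Bool.or_eq_true_iff.1 hv with h | h
                · exact Or.inr (by simpa using h)
                · rw [PySem.Dict.contains_empty] at h; cases h
            · rw [hbody, PySem.Dict.get?_insert, if_neg hk', PySem.Dict.get?_insert, if_neg hk']
              constructor
              · rintro (h | hv)
                · exact h
                · exact absurd (congrArg Prod.fst hv) (by simpa using hk')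
              · exact Or.inl
    · have hx' : (x.1 != key) = true := by simp [bne, hx]
      simp only [pvAltLoop, hx', if_pos, List.foldl_cons, if_neg hx]
      exact ih em seen m hnd h1 h2

-- ===== VERDICT (by name: the statement is the Claim_ definition above) =====
theorem get_objects_edges_map_frequency_spec : Claim_equal_get_objects_edges_map_frequency := by
  intro key res _ hpre
  unfold Spec_get_objects_edges_map_frequency
  unfold get_objects_edges_map_frequency get_objects_edges_map_frequency_alt
  cases h : (PySem.Dict.ofList res).get? "edges" with
  | none =>
    -- inside Pre_ the "edges" lookup cannot be none
    exact absurd hpre (by simp [Pre_get_objects_edges_map_frequency, h])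
  | some inner =>
    dsimp only
    rw [List.foldl_filter]
    rw [pvLoop_inv key (pvDecodeEdges inner) (pvDecodeEdges inner).keys
        PySem.Dict.empty PySem.Set.empty PySem.Dict.empty
        (by simp [PySem.Dict.empty]) (by simp [PySem.Dict.empty]) (by
          intro k v
          constructor
          · intro hkv; cases hkv
          · rintro ⟨c, hc, -⟩; rw [PySem.Dict.get?_empty] at hc; cases hc)]
    rw [List.map_map]
    rfl
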